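-- pv_equiv track=rewrite | github.com/DeepralShakya/lalitpur-house-price-prediction-python | app.py | format_to_nepali_style
-- ===== SOURCE A (Python) =====
-- def format_to_nepali_style(number):
--     str_number = str(int(number))
--     last_three_digits = str_number[-3:]
--     rest_of_the_number = str_number[:-3]
--
--     if not rest_of_the_number:
--         return last_three_digits
--
--     rest_of_the_number_formatted = ''
--     while len(rest_of_the_number) > 0:
--         rest_of_the_number_formatted = ',' + rest_of_the_number[-2:] + rest_of_the_number_formatted
--         rest_of_the_number = rest_of_the_number[:-2]
--
--     return rest_of_the_number_formatted[1:] + ',' + last_three_digits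
-- ===== SOURCE B (Python) =====
-- def format_to_nepali_style(number):
--     s = str(int(number))
--     out = []
--     rem = len(s)
--     for ch in s:
--         rem -= 1
--         out.append(ch)
--         if rem >= 3 and rem % 2 == 1:
--             out.append(',')
--     return ''.join(out)
-- ===== Notes on version B (the rewrite author's own statement) =====
-- stated objective: simpler
-- what changed: Replaced A's split into last-three plus a right-to-left slice-and-trim while loop (repeated [-2:]/[:-2] slicing and string prepending) with a single left-to-right pass over the digit string that emits a comma whenever the count of remaining characters is odd and at least 3.
import Mathlib
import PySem

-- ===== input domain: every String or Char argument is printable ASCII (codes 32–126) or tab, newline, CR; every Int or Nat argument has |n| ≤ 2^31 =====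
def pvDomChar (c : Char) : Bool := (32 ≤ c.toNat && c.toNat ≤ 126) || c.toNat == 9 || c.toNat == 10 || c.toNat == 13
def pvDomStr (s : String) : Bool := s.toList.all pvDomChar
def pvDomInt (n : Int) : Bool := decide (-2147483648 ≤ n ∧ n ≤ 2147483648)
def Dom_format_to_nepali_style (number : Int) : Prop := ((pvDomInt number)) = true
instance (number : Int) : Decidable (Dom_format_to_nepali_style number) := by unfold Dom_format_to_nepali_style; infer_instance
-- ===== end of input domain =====

-- B is a single left-to-right pass inserting a comma whenever the remaining-character
-- count is odd and ≥ 3, replacing A's right-to-left slice-and-trim loop (objective: simpler).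

-- ===== PORT A =====
-- the while loop: formatted = ',' + rest[-2:] + formatted; rest = rest[:-2]
def pvALoop (r fmt : List Char) : List Char :=
  if _h : 0 < r.length then
    pvALoop (PySem.List.slice r none (some (-2))) (',' :: PySem.List.slice r (some (-2)) none ++ fmt)
  else fmt
termination_by r.length
decreasing_by
  rw [PySem.List.slice_to_neg_ofNat r 2 (by omega)]
  simp only [List.length_take]
  omega

def format_to_nepali_style (number : Int) : String :=
  let s := PySem.Int.toChars number                       -- str(int(number)); int is identity on Int
  let last3 := PySem.List.slice s (some (-3)) none        -- str_number[-3:]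
  let rest := PySem.List.slice s none (some (-3))         -- str_number[:-3]
  if rest = [] then String.mk last3
  else String.mk (PySem.List.slice (pvALoop rest []) (some 1) none ++ ',' :: last3)

-- ===== PORT B =====
-- the for loop over s, carrying rem = number of characters not yet consumed (before ch)
def pvBGo (rem : Nat) : List Char → List Char
  | [] => []
  | c :: rest =>
    let rem' := rem - 1
    if 3 ≤ rem' ∧ rem' % 2 = 1 then c :: ',' :: pvBGo rem' rest
    else c :: pvBGo rem' rest

def format_to_nepali_style_alt (number : Int) : String :=
  let s := PySem.Int.toChars number
  String.mk (pvBGo s.length s)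

-- ===== PRECONDITION & SPEC =====
def Spec_format_to_nepali_style (number : Int) (out : String) : Prop := out = format_to_nepali_style_alt number
instance (number : Int) (out : String) : Decidable (Spec_format_to_nepali_style number out) := by unfold Spec_format_to_nepali_style; infer_instance

-- ===== CLAIM (what is proved, stated in full; the proofs are below) =====
def Claim_equal_format_to_nepali_style : Prop := ∀ (number : Int), Dom_format_to_nepali_style number → Spec_format_to_nepali_style number (format_to_nepali_style number)

-- ===== LEMMAS AND PROOFS =====

-- left-peeling normal form of A's comma insertion on the "rest" part
def pvBody (r : List Char) : List Char :=
  if _h : r.length ≤ 2 then r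
  else if r.length % 2 = 0 then r.take 2 ++ ',' :: pvBody (r.drop 2)
  else r.take 1 ++ ',' :: pvBody (r.drop 1)
termination_by r.length
decreasing_by all_goals simp only [List.length_drop]; omega

theorem pvBGo_len (l : List Char) (c : Char) :
    pvBGo (c :: l).length (c :: l) =
      (if 3 ≤ l.length ∧ l.length % 2 = 1 then c :: ',' :: pvBGo l.length l
       else c :: pvBGo l.length l) := by
  simp [pvBGo]

theorem pvBGo_short (l : List Char) (h : l.length ≤ 3) : pvBGo l.length l = l := by
  induction l with
  | nil => simp [pvBGo]
  | cons c rest ih =>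
    rw [pvBGo_len]
    have hr : rest.length < 3 := by simpa using h
    rw [if_neg (by omega)]
    rw [ih (by omega)]

theorem pvALoop_acc : ∀ (n : Nat) (r : List Char), r.length = n → ∀ (acc : List Char),
    pvALoop r acc = pvALoop r [] ++ acc := by
  intro n
  induction n using Nat.strong_induction_on with
  | _ n ih =>
    intro r hlen acc
    by_cases h : 0 < r.length
    · rw [pvALoop, dif_pos h]
      conv_rhs => rw [pvALoop, dif_pos h]
      have hlt : (PySem.List.slice r none (some (-2))).length < n := by
        rw [PySem.List.slice_to_neg_ofNat r 2 (by omega)]; simp; omega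
      rw [ih _ hlt _ rfl]
      conv_rhs => rw [ih _ hlt _ rfl]
      simp
    · rw [pvALoop, dif_neg h, pvALoop, dif_neg h]
      simp

-- pvBody splits off the last pair, matching one iteration of A's while loop
theorem pvBody_split : ∀ (n : Nat) (r : List Char), r.length = n → 3 ≤ r.length →
    pvBody r = pvBody (r.take (r.length - 2)) ++ ',' :: r.drop (r.length - 2) := by
  intro n
  induction n using Nat.strong_induction_on with
  | _ n ih =>
    intro r hlen h3
    by_cases he : r.length % 2 = 0
    · rw [pvBody, dif_neg (by omega), if_pos he]
      by_cases h4 : r.length = 4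
      · rw [show r.length - 2 = 2 by omega]
        rw [show pvBody (r.take 2) = r.take 2 by rw [pvBody, dif_pos (by simp only [List.length_take]; omega)]]
        rw [show pvBody (r.drop 2) = r.drop 2 by rw [pvBody, dif_pos (by simp; omega)]]
      · have hd : (r.drop 2).length = r.length - 2 := by simp
        rw [ih (r.drop 2).length (by omega) (r.drop 2) rfl (by omega)]
        rw [show pvBody (r.take (r.length - 2)) =
              (r.take (r.length - 2)).take 2 ++ ',' :: pvBody ((r.take (r.length - 2)).drop 2) by
          rw [pvBody, dif_neg (by simp; omega),
            if_pos (by simp only [List.length_take]; omega)]]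
        simp only [List.take_take, List.drop_take, List.drop_drop, List.length_drop,
          List.append_assoc, List.cons_append]
        rw [show min 2 (r.length - 2) = 2 by omega,
          show 2 + (r.length - 2 - 2) = r.length - 2 by omega]
    · rw [pvBody, dif_neg (by omega), if_neg he]
      by_cases h3' : r.length = 3
      · rw [show r.length - 2 = 1 by omega]
        rw [show pvBody (r.take 1) = r.take 1 by rw [pvBody, dif_pos (by simp only [List.length_take]; omega)]]
        rw [show pvBody (r.drop 1) = r.drop 1 by rw [pvBody, dif_pos (by simp; omega)]]
      · have hd : (r.drop 1).length = r.length - 1 := by simp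
        rw [ih (r.drop 1).length (by omega) (r.drop 1) rfl (by omega)]
        rw [show pvBody (r.take (r.length - 2)) =
              (r.take (r.length - 2)).take 1 ++ ',' :: pvBody ((r.take (r.length - 2)).drop 1) by
          rw [pvBody, dif_neg (by simp; omega),
            if_neg (by simp only [List.length_take]; omega)]]
        simp only [List.take_take, List.drop_take, List.drop_drop, List.length_drop,
          List.append_assoc, List.cons_append]
        rw [show 1 + (r.length - 1 - 2) = r.length - 2 by omega,
          show r.length - 1 - 2 = r.length - 2 - 1 by omega,
          show min 1 (r.length - 2) = 1 by omega]

theorem pvALoop_eq_body : ∀ (n : Nat) (r : List Char), r.length = n → r ≠ [] →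
    pvALoop r [] = ',' :: pvBody r := by
  intro n
  induction n using Nat.strong_induction_on with
  | _ n ih =>
    intro r hlen hne
    have h0 : 0 < r.length := List.length_pos_of_ne_nil hne
    rw [pvALoop, dif_pos h0]
    rw [PySem.List.slice_to_neg_ofNat r 2 (by omega), PySem.List.slice_from_neg_ofNat r 2 (by omega)]
    by_cases h2 : r.length ≤ 2
    · rw [show r.length - 2 = 0 by omega]
      simp only [List.take_zero, List.drop_zero]
      rw [pvALoop, dif_neg (by simp)]
      rw [pvBody, dif_pos h2]
      simp
    · rw [pvALoop_acc (r.take (r.length - 2)).length (r.take (r.length - 2)) (by rfl)]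
      have ht : (r.take (r.length - 2)).length = r.length - 2 := by simp only [List.length_take]; omega
      rw [ih (r.length - 2) (by omega) (r.take (r.length - 2)) ht
        (by intro hn; have := congrArg List.length hn; simp at this; omega)]
      rw [pvBody_split r.length r rfl (by omega)]
      simp

-- B's single pass equals pvBody on the front ++ comma ++ last three
theorem pvBGo_eq : ∀ (n : Nat) (l : List Char), l.length = n → 3 < l.length →
    pvBGo l.length l = pvBody (l.take (l.length - 3)) ++ ',' :: l.drop (l.length - 3) := by
  intro n
  induction n using Nat.strong_induction_on with
  | _ n ih =>
    intro l hlen h3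
    obtain ⟨c, rest, rfl⟩ : ∃ c rest, l = c :: rest := by
      cases l with | nil => simp at h3 | cons a b => exact ⟨a, b, rfl⟩
    simp only [List.length_cons] at hlen
    rw [pvBGo_len]
    simp only [List.length_cons] at h3 ⊢
    by_cases he : (rest.length + 1) % 2 = 0
    · -- even total length: comma after the first char (group of 1)
      rw [if_pos (by omega)]
      rw [show rest.length + 1 - 3 = rest.length - 2 by omega]
      by_cases h4 : rest.length + 1 = 4
      · rw [pvBGo_short rest (by omega)]
        rw [show rest.length - 2 = 1 by omega]
        simp only [List.take_succ_cons, List.take_zero, List.drop_succ_cons, List.drop_zero]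
        rw [pvBody, dif_pos (by simp)]
        simp
      · rw [ih rest.length (by omega) rest rfl (by omega)]
        rw [show pvBody ((c :: rest).take (rest.length - 2)) =
              ((c :: rest).take (rest.length - 2)).take 1 ++ ','
                :: pvBody (((c :: rest).take (rest.length - 2)).drop 1) by
          rw [pvBody, dif_neg (by simp; omega)]
          rw [if_neg (by simp only [List.length_take, List.length_cons]; omega)]]
        have h1 : ((c :: rest).take (rest.length - 2)).take 1 = [c] := by
          rw [List.take_take]
          rw [show min 1 (rest.length - 2) = 1 by omega]
          rfl
        have h2 : ((c :: rest).take (rest.length - 2)).drop 1 = rest.take (rest.length - 3) := by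
          rw [show rest.length - 2 = (rest.length - 3) + 1 by omega]
          simp
        rw [h1, h2]
        rw [show (c :: rest).drop (rest.length - 2) = rest.drop (rest.length - 3) by
          rw [show rest.length - 2 = (rest.length - 3) + 1 by omega]; simp]
        simp
    · -- odd total length: group of 2 at the front
      rw [if_neg (by omega)]
      obtain ⟨c2, rest2, rfl⟩ : ∃ c2 rest2, rest = c2 :: rest2 := by
        cases rest with | nil => simp at h3 | cons a b => exact ⟨a, b, rfl⟩
      rw [pvBGo_len]
      simp only [List.length_cons] at he h3 hlen ⊢
      rw [if_pos (by omega)]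
      rw [show rest2.length + 1 + 1 - 3 = rest2.length - 1 by omega]
      by_cases h5 : rest2.length + 2 = 5
      · rw [pvBGo_short rest2 (by omega)]
        rw [show rest2.length - 1 = 2 by omega]
        simp only [List.take_succ_cons, List.take_zero, List.drop_succ_cons, List.drop_zero]
        rw [pvBody, dif_pos (by simp)]
        simp
      · have hge : 3 < rest2.length := by omega
        rw [ih rest2.length (by omega) rest2 rfl hge]
        rw [show pvBody ((c :: c2 :: rest2).take (rest2.length - 1)) =
              ((c :: c2 :: rest2).take (rest2.length - 1)).take 2 ++ ','
                :: pvBody (((c :: c2 :: rest2).take (rest2.length - 1)).drop 2) by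
          rw [pvBody, dif_neg (by simp only [List.length_take, List.length_cons]; omega)]
          rw [if_pos (by simp only [List.length_take, List.length_cons]; omega)]]
        have h1 : ((c :: c2 :: rest2).take (rest2.length - 1)).take 2 = [c, c2] := by
          rw [List.take_take]
          rw [show min 2 (rest2.length - 1) = 2 by omega]
          rfl
        have h2 : ((c :: c2 :: rest2).take (rest2.length - 1)).drop 2
            = rest2.take (rest2.length - 3) := by
          rw [show rest2.length - 1 = (rest2.length - 3) + 2 by omega]
          simp
        rw [h1, h2]
        rw [show (c :: c2 :: rest2).drop (rest2.length - 1) = rest2.drop (rest2.length - 3) by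
          rw [show rest2.length - 1 = (rest2.length - 3) + 2 by omega]; simp]
        simp

-- ===== VERDICT (by name: the statement is the Claim_ definition above) =====
theorem format_to_nepali_style_spec : Claim_equal_format_to_nepali_style := by
  intro number _
  unfold Spec_format_to_nepali_style format_to_nepali_style format_to_nepali_style_alt
  set s := PySem.Int.toChars number with hs
  simp only []
  rw [PySem.List.slice_to_neg_ofNat s 3 (by omega), PySem.List.slice_from_neg_ofNat s 3 (by omega)]
  by_cases h3 : s.length ≤ 3
  · rw [if_pos (by simp; omega)]
    rw [show s.length - 3 = 0 by omega]
    simp only [List.drop_zero]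
    rw [pvBGo_short s h3]
  · rw [if_neg (by intro hn; have := congrArg List.length hn; simp at this; omega)]
    rw [pvALoop_eq_body (s.take (s.length - 3)).length (s.take (s.length - 3)) rfl
      (by intro hn; have := congrArg List.length hn; simp at this; omega)]
    rw [PySem.List.slice_from_one]
    simp only [List.tail_cons]
    rw [pvBGo_eq s.length s rfl (by omega)]
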